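-- pv_equiv track=rewrite | github.com/the-other-sunny/Advent-of-Code-2023 | python/day11/part2.py | fix_coords
-- ===== SOURCE A (Python) =====
-- def fix_coords(
--     coords: list[tuple[int, int]],
--     unused_lines: set[int],
--     unused_columns: set[int],
--     expansion_factor: int,
-- ) -> list[tuple[int, int]]:
--     new_coords = []
--
--     for i, j in coords:
--         delta_i = sum(1 for index in unused_lines if index < i)
--         delta_j = sum(1 for index in unused_columns if index < j)
--         new_coords.append(
--             (i + (expansion_factor - 1) * delta_i, j + (expansion_factor - 1) * delta_j)
--         )
--
--     return new_coords
-- ===== SOURCE B (Python) =====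
-- def fix_coords(
--     coords: list[tuple[int, int]],
--     unused_lines: set[int],
--     unused_columns: set[int],
--     expansion_factor: int,
-- ) -> list[tuple[int, int]]:
--     rows = sorted(unused_lines)
--     cols = sorted(unused_columns)
--     growth = expansion_factor - 1
--
--     def count_below(sorted_vals, x):
--         # index of the first element >= x (bisect_left), hand-written
--         lo, hi = 0, len(sorted_vals)
--         while lo < hi:
--             mid = (lo + hi) // 2
--             if sorted_vals[mid] < x:
--                 lo = mid + 1
--             else:
--                 hi = mid
--         return lo
--
--     return [
--         (i + growth * count_below(rows, i), j + growth * count_below(cols, j))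
--         for i, j in coords
--     ]
-- ===== Notes on version B (the rewrite author's own statement) =====
-- stated objective: faster
-- what changed: Instead of scanning all unused lines/columns once per coordinate, B sorts each unused set once and counts elements below a coordinate with a binary search (bisect_left).
import Mathlib
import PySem

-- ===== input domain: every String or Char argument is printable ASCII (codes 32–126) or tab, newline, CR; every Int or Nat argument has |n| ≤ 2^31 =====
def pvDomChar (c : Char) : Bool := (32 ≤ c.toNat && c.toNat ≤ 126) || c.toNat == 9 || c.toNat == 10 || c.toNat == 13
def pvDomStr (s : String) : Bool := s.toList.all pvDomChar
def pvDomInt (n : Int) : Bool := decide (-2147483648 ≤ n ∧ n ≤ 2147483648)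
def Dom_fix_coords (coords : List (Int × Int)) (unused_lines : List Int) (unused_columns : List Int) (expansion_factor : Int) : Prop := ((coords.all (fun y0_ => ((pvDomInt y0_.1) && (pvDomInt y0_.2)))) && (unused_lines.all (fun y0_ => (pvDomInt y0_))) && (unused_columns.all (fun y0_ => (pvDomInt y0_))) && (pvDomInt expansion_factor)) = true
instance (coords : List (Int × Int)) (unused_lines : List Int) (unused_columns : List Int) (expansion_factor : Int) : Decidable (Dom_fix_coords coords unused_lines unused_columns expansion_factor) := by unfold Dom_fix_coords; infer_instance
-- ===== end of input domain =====

-- ===== PORT A =====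
-- A: for each coordinate, scan the whole unused set counting entries below it.
def fix_coords (coords : List (Int × Int)) (unused_lines : List Int) (unused_columns : List Int) (expansion_factor : Int) : List (Int × Int) :=
  coords.foldl
    (fun new_coords p =>
      let delta_i : Int := unused_lines.foldl (fun s idx => if idx < p.1 then s + 1 else s) 0
      let delta_j : Int := unused_columns.foldl (fun s idx => if idx < p.2 then s + 1 else s) 0
      new_coords ++ [(p.1 + (expansion_factor - 1) * delta_i, p.2 + (expansion_factor - 1) * delta_j)])
    []

-- ===== PORT B =====
-- B: sort the unused sets once, then count entries below a coordinate by binary search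
-- (Source B's hand-written bisect_left loop = PySem.List.bisectLeft).
def fix_coords_alt (coords : List (Int × Int)) (unused_lines : List Int) (unused_columns : List Int) (expansion_factor : Int) : List (Int × Int) :=
  let rows := PySem.List.sorted unused_lines (fun x => x) false
  let cols := PySem.List.sorted unused_columns (fun x => x) false
  let growth := expansion_factor - 1
  coords.map (fun p =>
    (p.1 + growth * (PySem.List.bisectLeft rows p.1 : Int),
     p.2 + growth * (PySem.List.bisectLeft cols p.2 : Int)))

-- ===== PRECONDITION & SPEC =====
def Spec_fix_coords (coords : List (Int × Int)) (unused_lines : List Int) (unused_columns : List Int) (expansion_factor : Int) (out : List (Int × Int)) : Prop := out = fix_coords_alt coords unused_lines unused_columns expansion_factor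
instance (coords : List (Int × Int)) (unused_lines : List Int) (unused_columns : List Int) (expansion_factor : Int) (out : List (Int × Int)) : Decidable (Spec_fix_coords coords unused_lines unused_columns expansion_factor out) := by unfold Spec_fix_coords; infer_instance

-- ===== CLAIM (what is proved, stated in full; the proofs are below) =====
def Claim_equal_fix_coords : Prop := ∀ (coords : List (Int × Int)) (unused_lines : List Int) (unused_columns : List Int) (expansion_factor : Int), Dom_fix_coords coords unused_lines unused_columns expansion_factor → Spec_fix_coords coords unused_lines unused_columns expansion_factor (fix_coords coords unused_lines unused_columns expansion_factor)

-- ===== LEMMAS AND PROOFS =====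
-- countP of a sorted list is determined by the boundary index k
lemma countP_eq_of_boundary (x : Int) : ∀ (s : List Int) (k : Nat), k ≤ s.length →
    (∀ (j : Nat) (hj : j < s.length), j < k → s[j] < x) →
    (∀ (j : Nat) (hj : j < s.length), k ≤ j → x ≤ s[j]) →
    s.countP (fun y => decide (y < x)) = k := by
  intro s
  induction s with
  | nil => intro k hk _ _; simp only [List.countP_nil, List.length_nil] at hk ⊢; omega
  | cons a t ih =>
    intro k hk hlt hge
    cases k with
    | zero =>
      have hall : ∀ y ∈ (a :: t), ¬ (decide (y < x) = true) := by
        intro y hy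
        obtain ⟨j, hj, hjy⟩ := List.mem_iff_getElem.mp hy
        have := hge j hj (Nat.zero_le _)
        simp [hjy] at this ⊢
        omega
      simpa using List.countP_eq_zero.mpr hall
    | succ m =>
      have ha : a < x := by
        have := hlt 0 (by simp) (Nat.succ_pos _)
        simpa using this
      have ht : t.countP (fun y => decide (y < x)) = m := by
        apply ih m (by simpa using hk)
        · intro j hj hjm
          have := hlt (j+1) (by simpa using Nat.succ_lt_succ hj) (Nat.succ_lt_succ hjm)
          simpa using this
        · intro j hj hmj
          have := hge (j+1) (by simpa using Nat.succ_lt_succ hj) (Nat.succ_le_succ hmj)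
          simpa using this
      simp [List.countP_cons, ha, ht]

-- A's inner generator sum is countP
lemma foldl_count_eq_countP (x : Int) : ∀ (l : List Int) (acc : Int),
    l.foldl (fun s idx => if idx < x then s + 1 else s) acc
      = acc + (l.countP (fun y => decide (y < x)) : Int) := by
  intro l
  induction l with
  | nil => intro acc; simp
  | cons a t ih =>
    intro acc
    by_cases ha : a < x <;> simp [List.foldl_cons, List.countP_cons, ha, ih] <;> ring

-- the scan-count over the raw list equals bisect on the sorted list
lemma count_eq_bisect (l : List Int) (x : Int) :
    l.foldl (fun s idx => if idx < x then s + 1 else s) (0 : Int)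
      = (PySem.List.bisectLeft (PySem.List.sorted l (fun x => x) false) x : Int) := by
  set s := PySem.List.sorted l (fun x => x) false with hs
  have hsorted : s.Pairwise (fun a b => a ≤ b) := by
    simpa using PySem.List.sorted_pairwise (xs := l) (key := fun x => x)
  obtain ⟨hle, hlt, hge⟩ := PySem.List.bisectLeft_spec s x hsorted
  have hcs : s.countP (fun y => decide (y < x)) = PySem.List.bisectLeft s x :=
    countP_eq_of_boundary x s _ hle hlt hge
  have hperm : s.Perm l := PySem.List.sorted_perm l (fun x => x) false
  rw [foldl_count_eq_countP, ← hperm.countP_eq, hcs]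
  ring

-- ===== VERDICT (by name: the statement is the Claim_ definition above) =====
theorem fix_coords_spec : Claim_equal_fix_coords := by
  intro coords unused_lines unused_columns expansion_factor _
  unfold Spec_fix_coords fix_coords fix_coords_alt
  rw [PySem.List.foldl_append_singleton_eq_map]
  apply List.map_congr_left
  intro p _
  simp only [count_eq_bisect]
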